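-- pv_equiv track=rewrite | github.com/eloyf26/advanced_rag | agentic_rag_agent/tools/analysis_tools.py | _count_technical_terms
-- ===== SOURCE A (Python) =====
-- def _count_technical_terms(text: str) -> int:
--     """
--     Count technical terms in the text
--     """
--     technical_indicators = [
--         'algorithm', 'framework', 'architecture', 'implementation',
--         'methodology', 'optimization', 'configuration', 'integration',
--         'deployment', 'scalability', 'performance', 'efficiency'
--     ]
--
--     text_lower = text.lower()
--     return sum(1 for term in technical_indicators if term in text_lower)
-- ===== SOURCE B (Python) =====
-- def _count_technical_terms(text: str) -> int:
--     """
--     Count technical terms in the text: scan the lowered text once, at each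
--     position test which terms start there, and count the distinct terms found.
--     """
--     technical_indicators = [
--         'algorithm', 'framework', 'architecture', 'implementation',
--         'methodology', 'optimization', 'configuration', 'integration',
--         'deployment', 'scalability', 'performance', 'efficiency'
--     ]
--     text_lower = text.lower()
--     found = set()
--     for i in range(len(text_lower)):
--         for term in technical_indicators:
--             if text_lower.startswith(term, i):
--                 found.add(term)
--     return len(found)
-- ===== Notes on version B (the rewrite author's own statement) =====
-- stated objective: alternative
-- what changed: Instead of twelve independent whole-text substring containment scans summed up, B makes a single left-to-right pass over the lowered text, testing at each position which terms start there and collecting the distinct matched terms in a set whose size is returned.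
import Mathlib
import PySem

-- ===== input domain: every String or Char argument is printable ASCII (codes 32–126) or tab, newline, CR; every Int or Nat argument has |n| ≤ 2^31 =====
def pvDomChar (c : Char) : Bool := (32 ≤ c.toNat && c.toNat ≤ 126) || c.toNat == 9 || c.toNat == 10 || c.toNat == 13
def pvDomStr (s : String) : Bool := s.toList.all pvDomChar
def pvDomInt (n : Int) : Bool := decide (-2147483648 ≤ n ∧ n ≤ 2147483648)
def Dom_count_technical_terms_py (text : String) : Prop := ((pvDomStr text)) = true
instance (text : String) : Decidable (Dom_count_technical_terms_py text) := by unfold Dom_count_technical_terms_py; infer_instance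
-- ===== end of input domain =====

-- B replaces A's 12 independent substring scans by a single left-to-right pass over the
-- lowered text that collects the distinct terms starting at each position in a set
-- (objective: alternative structure, same exact result).

-- ===== PORT A =====
def pvTermsA : List String :=
  ["algorithm", "framework", "architecture", "implementation",
   "methodology", "optimization", "configuration", "integration",
   "deployment", "scalability", "performance", "efficiency"]

def count_technical_terms_py (text : String) : Int :=
  let text_lower := PySem.Str.lower text
  (pvTermsA.map (fun term => if PySem.Str.isIn term text_lower then (1 : Int) else 0)).sum

-- ===== PORT B =====
def pvTermsB : List (List Char) :=
  ["algorithm".toList, "framework".toList, "architecture".toList, "implementation".toList,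
   "methodology".toList, "optimization".toList, "configuration".toList, "integration".toList,
   "deployment".toList, "scalability".toList, "performance".toList, "efficiency".toList]

-- 'text_lower.startswith(term, i)' is ported as 'PySem.Chars.startswith (tl.drop i) term',
-- exact for the 0 ≤ i < len(text_lower) produced by the range loop.
def count_technical_terms_py_alt (text : String) : Int :=
  let tl := PySem.Chars.lower text.toList
  let found : PySem.Set (List Char) :=
    (List.range tl.length).foldl
      (fun s i => pvTermsB.foldl
        (fun s term => if PySem.Chars.startswith (tl.drop i) term then PySem.Set.add s term else s) s)
      PySem.Set.empty
  (found.length : Int)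

-- ===== PRECONDITION & SPEC =====
def Spec_count_technical_terms_py (text : String) (out : Int) : Prop := out = count_technical_terms_py_alt text
instance (text : String) (out : Int) : Decidable (Spec_count_technical_terms_py text out) := by unfold Spec_count_technical_terms_py; infer_instance

-- ===== CLAIM (what is proved, stated in full; the proofs are below) =====
def Claim_equal_count_technical_terms_py : Prop := ∀ (text : String), Dom_count_technical_terms_py text → Spec_count_technical_terms_py text (count_technical_terms_py text)

-- ===== LEMMAS AND PROOFS =====

-- membership after the inner loop over the term list at one position
lemma pv_mem_inner (tl : List Char) (i : Nat) (terms : List (List Char))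
    (s : PySem.Set (List Char)) (y : List Char) :
    y ∈ terms.foldl
        (fun s term => if PySem.Chars.startswith (tl.drop i) term then PySem.Set.add s term else s) s
      ↔ y ∈ s ∨ (y ∈ terms ∧ PySem.Chars.startswith (tl.drop i) y = true) := by
  induction terms generalizing s with
  | nil => simp
  | cons t ts ih =>
    simp only [List.foldl_cons, ih]
    by_cases h : PySem.Chars.startswith (tl.drop i) t = true
    · simp [h, PySem.Set.mem_add]
      constructor
      · rintro ((hs | rfl) | ⟨hm, hsw⟩)
        · exact Or.inl hs
        · exact Or.inr ⟨Or.inl rfl, h⟩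
        · exact Or.inr ⟨Or.inr hm, hsw⟩
      · rintro (hs | ⟨(rfl | hm), hsw⟩)
        · exact Or.inl (Or.inl hs)
        · exact Or.inl (Or.inr rfl)
        · exact Or.inr ⟨hm, hsw⟩
    · simp [h]
      constructor
      · rintro (hs | ⟨hm, hsw⟩)
        · exact Or.inl hs
        · exact Or.inr ⟨Or.inr hm, hsw⟩
      · rintro (hs | ⟨(rfl | hm), hsw⟩)
        · exact Or.inl hs
        · exact absurd hsw h
        · exact Or.inr ⟨hm, hsw⟩

-- membership after the outer loop over the positions
lemma pv_mem_outer (tl : List Char) (positions : List Nat)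
    (s : PySem.Set (List Char)) (y : List Char) :
    y ∈ positions.foldl
        (fun s i => pvTermsB.foldl
          (fun s term => if PySem.Chars.startswith (tl.drop i) term then PySem.Set.add s term else s) s) s
      ↔ y ∈ s ∨ (y ∈ pvTermsB ∧ ∃ i ∈ positions, PySem.Chars.startswith (tl.drop i) y = true) := by
  induction positions generalizing s with
  | nil => simp
  | cons p ps ih =>
    simp only [List.foldl_cons, ih, pv_mem_inner]
    constructor
    · rintro ((hs | ⟨hm, hsw⟩) | ⟨hm, i, hi, hsw⟩)
      · exact Or.inl hs
      · exact Or.inr ⟨hm, p, by simp, hsw⟩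
      · exact Or.inr ⟨hm, i, by simp [hi], hsw⟩
    · rintro (hs | ⟨hm, i, hi, hsw⟩)
      · exact Or.inl (Or.inl hs)
      · rcases List.mem_cons.mp hi with rfl | hi'
        · exact Or.inl (Or.inr ⟨hm, hsw⟩)
        · exact Or.inr ⟨hm, i, hi', hsw⟩

-- the accumulated set stays duplicate-free
lemma pv_nodup_inner (tl : List Char) (i : Nat) (terms : List (List Char))
    (s : PySem.Set (List Char)) (hs : s.Nodup) :
    (terms.foldl
      (fun s term => if PySem.Chars.startswith (tl.drop i) term then PySem.Set.add s term else s) s).Nodup := by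
  induction terms generalizing s with
  | nil => exact hs
  | cons t ts ih =>
    simp only [List.foldl_cons]
    by_cases h : PySem.Chars.startswith (tl.drop i) t = true
    · simpa [h] using ih _ (PySem.Set.nodup_add s t hs)
    · simpa [h] using ih _ hs

lemma pv_nodup_outer (tl : List Char) (positions : List Nat)
    (s : PySem.Set (List Char)) (hs : s.Nodup) :
    (positions.foldl
      (fun s i => pvTermsB.foldl
        (fun s term => if PySem.Chars.startswith (tl.drop i) term then PySem.Set.add s term else s) s) s).Nodup := by
  induction positions generalizing s with
  | nil => exact hs
  | cons p ps ih => exact ih _ (pv_nodup_inner tl p pvTermsB s hs)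

-- a term occurs somewhere in tl iff the scan finds a position (< length) where it starts
lemma pv_exists_pos_iff_isIn (tl y : List Char) (hy : y ≠ []) :
    (∃ i ∈ List.range tl.length, PySem.Chars.startswith (tl.drop i) y = true)
      ↔ PySem.Chars.isIn y tl = true := by
  rw [← PySem.Chars.exists_prefix_drop_iff_isIn]
  constructor
  · rintro ⟨i, _, hsw⟩
    exact ⟨i, (PySem.Chars.startswith_iff _ _).mp hsw⟩
  · rintro ⟨j, hpre⟩
    refine ⟨j, ?_, (PySem.Chars.startswith_iff _ _).mpr hpre⟩
    rw [List.mem_range]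
    by_contra hge
    have : tl.drop j = [] := List.drop_eq_nil_of_le (le_of_not_gt hge)
    rw [this] at hpre
    exact hy (List.prefix_nil.mp hpre)

-- B's found set is (as a set) exactly the terms occurring in tl
lemma pv_found_perm (tl : List Char) :
    ((List.range tl.length).foldl
        (fun s i => pvTermsB.foldl
          (fun s term => if PySem.Chars.startswith (tl.drop i) term then PySem.Set.add s term else s) s)
        PySem.Set.empty).Perm
      (pvTermsB.filter (fun t => PySem.Chars.isIn t tl)) := by
  have hnodupT : pvTermsB.Nodup := by decide
  have hne : ∀ t ∈ pvTermsB, t ≠ [] := by decide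
  rw [List.perm_ext_iff_of_nodup
      (pv_nodup_outer tl _ _ (by simp [PySem.Set.empty]))
      (hnodupT.filter _)]
  intro y
  rw [pv_mem_outer, List.mem_filter]
  constructor
  · rintro (hs | ⟨hm, hex⟩)
    · simp [PySem.Set.empty] at hs
    · exact ⟨hm, (pv_exists_pos_iff_isIn tl y (hne y hm)).mp hex⟩
  · rintro ⟨hm, hin⟩
    exact Or.inr ⟨hm, (pv_exists_pos_iff_isIn tl y (hne y hm)).mpr hin⟩

-- A counts exactly the terms whose lowered-text containment test succeeds
lemma pv_A_eq_filter_length (text : String) :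
    count_technical_terms_py text
      = ((pvTermsB.filter (fun t => PySem.Chars.isIn t (PySem.Chars.lower text.toList))).length : Int) := by
  unfold count_technical_terms_py
  rw [PySem.List.sum_map_ite_one_zero (fun term => PySem.Str.isIn term (PySem.Str.lower text))]
  have hmap : pvTermsB = pvTermsA.map String.toList := by decide
  rw [List.countP_eq_length_filter, hmap, List.filter_map, List.length_map]
  congr 1
  refine congrArg List.length (List.filter_congr ?_)
  intro t _
  simp [Function.comp, PySem.Str.isIn]

-- ===== VERDICT (by name: the statement is the Claim_ definition above) =====
theorem count_technical_terms_py_spec : Claim_equal_count_technical_terms_py := by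
  intro text _
  unfold Spec_count_technical_terms_py count_technical_terms_py_alt
  rw [pv_A_eq_filter_length]
  exact_mod_cast congrArg Int.ofNat
    ((pv_found_perm (PySem.Chars.lower text.toList)).length_eq).symm
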